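-- pv_equiv track=rewrite | github.com/VRYella/NBDFinder | motifs.py | find_polyA_polyT_tracts
-- ===== SOURCE A (Python) =====
-- def find_polyA_polyT_tracts(seq: str, min_len: int = 7) -> list:
--     results = []
--     i = 0
--     n = len(seq)
--     while i < n:
--         if seq[i] == 'A' or seq[i] == 'T':
--             ch = seq[i]
--             start = i
--             while i < n and seq[i] == ch:
--                 i += 1
--             if i - start >= min_len:
--                 results.append((start, i-1, seq[start:i]))
--         else:
--             i += 1
--     return results
-- ===== SOURCE B (Python) =====
-- def find_polyA_polyT_tracts(seq: str, min_len: int = 7) -> list: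
--     # One flat pass: track the current run of equal characters; flush it
--     # whenever the character changes, and once more at the end.
--     results = []
--     run_start = 0
--     prev = None
--     for i, ch in enumerate(seq):
--         if ch != prev:
--             _flush(results, seq, run_start, i, min_len)
--             run_start = i
--             prev = ch
--     _flush(results, seq, run_start, len(seq), min_len)
--     return results
--
--
-- def _flush(results, seq, s, e, min_len):
--     if e > s and (seq[s] == 'A' or seq[s] == 'T') and e - s >= min_len:
--         results.append((s, e - 1, seq[s:e]))
-- ===== Notes on version B (the rewrite author's own statement) =====
-- stated objective: alternative
-- what changed: Replaces A's nested while-loop index scan (outer position scan plus inner run-consuming while with per-character indexing) by a single flat pass over enumerate(seq) that tracks the current run's start and previous character and flushes each maximal run when the character changes, filtering for A/T runs of sufficient length only at flush time.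
import Mathlib
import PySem

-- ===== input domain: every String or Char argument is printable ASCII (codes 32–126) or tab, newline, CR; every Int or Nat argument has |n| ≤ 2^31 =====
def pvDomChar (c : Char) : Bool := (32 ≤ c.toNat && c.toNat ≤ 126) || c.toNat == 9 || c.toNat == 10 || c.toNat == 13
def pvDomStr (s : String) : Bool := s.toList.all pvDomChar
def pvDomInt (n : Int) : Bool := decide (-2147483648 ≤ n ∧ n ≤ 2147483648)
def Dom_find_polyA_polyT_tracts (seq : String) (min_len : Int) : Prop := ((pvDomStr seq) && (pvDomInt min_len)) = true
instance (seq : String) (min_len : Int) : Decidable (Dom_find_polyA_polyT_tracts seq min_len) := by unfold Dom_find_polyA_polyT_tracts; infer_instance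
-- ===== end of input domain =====

-- B replaces A's nested index scan (outer while + inner run-consuming while) by one flat
-- pass over enumerate(seq) that flushes each maximal run when the character changes
-- (objective: alternative decomposition, same cost).

-- ===== PORT A =====
-- A's inner while loop: number of leading characters equal to ch
def pvRunWhile (cs : List Char) (ch : Char) : Nat :=
  match cs with
  | [] => 0
  | c :: t => if c = ch then pvRunWhile t ch + 1 else 0

-- cited by pvAGo's decreasing_by
theorem pvRunWhile_cons_self (t : List Char) (c : Char) :
    pvRunWhile (c :: t) c = pvRunWhile t c + 1 := by
  simp [pvRunWhile]

-- A's outer while loop over positions i; seq[start:i] is ported as take of the suffix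
def pvAGo (min_len : Int) (cs : List Char) (i : Nat) : List (Int × Int × String) :=
  match cs with
  | [] => []
  | c :: t =>
    if c = 'A' ∨ c = 'T' then
      let k := pvRunWhile (c :: t) c
      (if min_len ≤ (k : Int) then
        [((i : Int), (i : Int) + (k : Int) - 1, String.mk ((c :: t).take k))] else [])
        ++ pvAGo min_len ((c :: t).drop k) (i + k)
    else pvAGo min_len t (i + 1)
termination_by cs.length
decreasing_by
  · rw [pvRunWhile_cons_self]
    simp
  · simp

def find_polyA_polyT_tracts (seq : String) (min_len : Int) : List (Int × Int × String) :=
  pvAGo min_len seq.toList 0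

-- ===== PORT B =====
-- enumerate(seq) starting at index i
def pvEnum (i : Nat) (cs : List Char) : List (Nat × Char) :=
  match cs with
  | [] => []
  | c :: t => (i, c) :: pvEnum (i + 1) t

-- _flush: its guard ensures s < e ≤ len, so seq[s] is in range and is ported as getD;
-- the slice seq[s:e] is ported as take/drop (exact for 0 ≤ s ≤ e ≤ len)
def pvFlush (all : List Char) (min_len : Int) (acc : List (Int × Int × String))
    (s e : Nat) : List (Int × Int × String) :=
  if s < e ∧ (all.getD s ' ' = 'A' ∨ all.getD s ' ' = 'T') ∧ min_len ≤ (e : Int) - (s : Int) then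
    acc ++ [((s : Int), (e : Int) - 1, String.mk ((all.drop s).take (e - s)))]
  else acc

-- loop body of B's single for-loop: state = (results, run_start, prev)
def pvStep (all : List Char) (min_len : Int)
    (st : List (Int × Int × String) × Nat × Option Char) (p : Nat × Char) :
    List (Int × Int × String) × Nat × Option Char :=
  if st.2.2 ≠ some p.2 then (pvFlush all min_len st.1 st.2.1 p.1, p.1, some p.2) else st

def find_polyA_polyT_tracts_alt (seq : String) (min_len : Int) : List (Int × Int × String) :=
  let all := seq.toList
  let st := List.foldl (pvStep all min_len) ([], 0, none) (pvEnum 0 all)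
  pvFlush all min_len st.1 st.2.1 all.length

-- ===== PRECONDITION & SPEC =====
def Spec_find_polyA_polyT_tracts (seq : String) (min_len : Int) (out : List (Int × Int × String)) : Prop := out = find_polyA_polyT_tracts_alt seq min_len
instance (seq : String) (min_len : Int) (out : List (Int × Int × String)) : Decidable (Spec_find_polyA_polyT_tracts seq min_len out) := by unfold Spec_find_polyA_polyT_tracts; infer_instance

-- ===== CLAIM (what is proved, stated in full; the proofs are below) =====
def Claim_equal_find_polyA_polyT_tracts : Prop := ∀ (seq : String) (min_len : Int), Dom_find_polyA_polyT_tracts seq min_len → Spec_find_polyA_polyT_tracts seq min_len (find_polyA_polyT_tracts seq min_len)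

-- ===== LEMMAS AND PROOFS =====

theorem pvRunWhile_cons_ne (t : List Char) (c d : Char) (h : d ≠ c) :
    pvRunWhile (d :: t) c = 0 := by
  simp [pvRunWhile, h]

-- reference function: process whole maximal runs, emitting the filtered tract for each
def pvR (min_len : Int) (cs : List Char) (i : Nat) : List (Int × Int × String) :=
  match cs with
  | [] => []
  | c :: t =>
    let k := pvRunWhile t c + 1
    (if (c = 'A' ∨ c = 'T') ∧ min_len ≤ (k : Int) then
      [((i : Int), (i : Int) + (k : Int) - 1, String.mk ((c :: t).take k))] else [])
      ++ pvR min_len (t.drop (pvRunWhile t c)) (i + k)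
termination_by cs.length
decreasing_by
  simp only [List.length_cons, List.length_drop]
  omega

theorem pvR_skip (min_len : Int) (c : Char) (t : List Char) (i : Nat)
    (h : ¬ (c = 'A' ∨ c = 'T')) : pvR min_len (c :: t) i = pvR min_len t (i + 1) := by
  match t with
  | [] => simp [pvR, pvRunWhile, h]
  | d :: t' =>
    by_cases hdc : d = c
    · subst hdc
      rw [pvR, pvR]
      rw [if_neg (fun hh => h hh.1), if_neg (fun hh => h hh.1)]
      simp only [pvRunWhile_cons_self, List.nil_append, List.drop_succ_cons]
      congr 1
      omega
    · rw [pvR]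
      rw [if_neg (fun hh => h hh.1)]
      rw [pvRunWhile_cons_ne t' c d hdc]
      simp

theorem pvAGo_eq_R (min_len : Int) (cs : List Char) (i : Nat) :
    pvAGo min_len cs i = pvR min_len cs i := by
  match cs with
  | [] => simp [pvAGo, pvR]
  | c :: t =>
    by_cases h : c = 'A' ∨ c = 'T'
    · rw [pvAGo, pvR]
      rw [if_pos h]
      simp only [pvRunWhile_cons_self, List.drop_succ_cons]
      rw [pvAGo_eq_R min_len (t.drop (pvRunWhile t c)) (i + (pvRunWhile t c + 1))]
      congr 1
      simp [h]
    · rw [pvAGo, if_neg h, pvAGo_eq_R min_len t (i + 1), pvR_skip min_len c t i h]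
termination_by cs.length
decreasing_by
  · simp only [List.length_cons, List.length_drop]
    omega
  · simp

theorem pvRunWhile_le (t : List Char) (c : Char) : pvRunWhile t c ≤ t.length := by
  induction t with
  | nil => simp [pvRunWhile]
  | cons d t ih => by_cases h : d = c <;> simp [pvRunWhile, h] <;> omega

theorem pvEnum_append (i : Nat) (u v : List Char) :
    pvEnum i (u ++ v) = pvEnum i u ++ pvEnum (i + u.length) v := by
  induction u generalizing i with
  | nil => simp [pvEnum]
  | cons c u ih =>
    simp [pvEnum, ih]
    ring_nf

theorem pvLoop_const (all : List Char) (min_len : Int) (c : Char)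
    (acc : List (Int × Int × String)) (s : Nat) :
    ∀ (u : List Char) (j : Nat), (∀ x ∈ u, x = c) →
      List.foldl (pvStep all min_len) (acc, s, some c) (pvEnum j u) = (acc, s, some c) := by
  intro u
  induction u with
  | nil => intro j _; simp [pvEnum]
  | cons d u ih =>
    intro j h
    have hd : d = c := h d (by simp)
    simp only [pvEnum, List.foldl_cons]
    rw [show pvStep all min_len (acc, s, some c) (j, d) = (acc, s, some c) by
      simp [pvStep, hd]]
    exact ih (j + 1) (fun x hx => h x (by simp [hx]))

theorem pvTake_runWhile (t : List Char) (c : Char) :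
    ∀ x ∈ t.take (pvRunWhile t c), x = c := by
  induction t with
  | nil => simp [pvRunWhile]
  | cons d t ih =>
    by_cases h : d = c
    · subst h
      rw [pvRunWhile_cons_self, List.take_succ_cons]
      intro x hx
      rcases List.mem_cons.mp hx with h1 | h1
      · exact h1
      · exact ih x h1
    · simp [pvRunWhile, h]

theorem pvDrop_runWhile_ne (t : List Char) (c d : Char) (t' : List Char)
    (h : t.drop (pvRunWhile t c) = d :: t') : d ≠ c := by
  induction t generalizing t' with
  | nil => simp [pvRunWhile] at h
  | cons e t ih =>
    by_cases he : e = c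
    · subst he
      rw [pvRunWhile_cons_self, List.drop_succ_cons] at h
      exact ih t' h
    · rw [pvRunWhile_cons_ne t c e he, List.drop_zero] at h
      cases h
      exact he

theorem pvGetD_of_drop (all : List Char) (s : Nat) (c : Char) (t : List Char)
    (h : all.drop s = c :: t) : all.getD s ' ' = c := by
  have h2 : (all.drop s).getD 0 ' ' = c := by rw [h]; rfl
  rw [List.getD_eq_getElem?_getD, List.getElem?_drop, Nat.add_zero,
    ← List.getD_eq_getElem?_getD] at h2
  exact h2

-- the heart of the proof: starting inside a run (at position s, prev = its character),
-- running B's loop over the rest of the string and flushing at the end yields exactly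
-- the run-by-run reference pvR
theorem pvLoop_run (all : List Char) (min_len : Int) (s : Nat)
    (acc : List (Int × Int × String)) (c : Char) (t : List Char)
    (hsd : all.drop s = c :: t) :
    (let st := List.foldl (pvStep all min_len) (acc, s, some c) (pvEnum (s + 1) t)
     pvFlush all min_len st.1 st.2.1 all.length) = acc ++ pvR min_len (c :: t) s := by
  have hsle : s ≤ all.length := by
    by_contra hcon
    rw [List.drop_eq_nil_of_le (by omega)] at hsd; cases hsd
  have hlen : all.length = s + 1 + t.length := by
    have h2 := congrArg List.length hsd
    simp only [List.length_drop, List.length_cons] at h2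
    omega
  have hget : all.getD s ' ' = c := pvGetD_of_drop all s c t hsd
  have hmle : pvRunWhile t c ≤ t.length := pvRunWhile_le t c
  have htl : (t.take (pvRunWhile t c)).length = pvRunWhile t c := by
    simp [List.length_take]
    omega
  have henum : pvEnum (s + 1) t
      = pvEnum (s + 1) (t.take (pvRunWhile t c))
        ++ pvEnum (s + 1 + pvRunWhile t c) (t.drop (pvRunWhile t c)) := by
    conv_lhs => rw [← List.take_append_drop (pvRunWhile t c) t]
    rw [pvEnum_append, htl]
  simp only []
  rw [henum, List.foldl_append,
    pvLoop_const all min_len c acc s (t.take (pvRunWhile t c)) (s + 1) (pvTake_runWhile t c)]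
  have hflush : pvFlush all min_len acc s (s + 1 + pvRunWhile t c)
      = acc ++ (if (c = 'A' ∨ c = 'T') ∧ min_len ≤ ((pvRunWhile t c + 1 : Nat) : Int) then
          [((s : Int), (s : Int) + ((pvRunWhile t c + 1 : Nat) : Int) - 1,
            String.mk ((c :: t).take (pvRunWhile t c + 1)))] else []) := by
    rw [pvFlush, hget, hsd]
    rw [show s + 1 + pvRunWhile t c - s = pvRunWhile t c + 1 from by omega]
    by_cases hc : (c = 'A' ∨ c = 'T') ∧ min_len ≤ ((pvRunWhile t c + 1 : Nat) : Int)
    · rw [if_pos ⟨by omega, hc.1, by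
        have := hc.2
        push_cast at this ⊢
        omega⟩, if_pos hc]
      rw [show ((s + 1 + pvRunWhile t c : Nat) : Int) - 1
          = (s : Int) + ((pvRunWhile t c + 1 : Nat) : Int) - 1 from by push_cast; omega]
    · rw [if_neg (fun hcon => hc ⟨hcon.2.1, by
        have := hcon.2.2
        push_cast at this ⊢
        omega⟩), if_neg hc, List.append_nil]
  cases hdrop : t.drop (pvRunWhile t c) with
  | nil =>
    have htm : t.length = pvRunWhile t c := by
      have h2 := congrArg List.length hdrop
      simp only [List.length_drop, List.length_nil] at h2
      omega
    simp only [pvEnum, List.foldl_nil]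
    rw [show all.length = s + 1 + pvRunWhile t c from by omega, hflush]
    conv_rhs => rw [pvR]
    rw [hdrop]
    simp [pvR]
  | cons d t' =>
    have hdc : d ≠ c := pvDrop_runWhile_ne t c d t' hdrop
    have hdrop2 : all.drop (s + 1 + pvRunWhile t c) = d :: t' := by
      rw [show s + 1 + pvRunWhile t c = s + (1 + pvRunWhile t c) by omega,
        ← List.drop_drop, hsd]
      rw [show 1 + pvRunWhile t c = pvRunWhile t c + 1 by omega]
      rw [List.drop_succ_cons]
      exact hdrop
    have htlen : t.length = pvRunWhile t c + 1 + t'.length := by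
      have h2 := congrArg List.length hdrop
      simp only [List.length_drop, List.length_cons] at h2
      omega
    simp only [pvEnum, List.foldl_cons]
    rw [show pvStep all min_len (acc, s, some c) (s + 1 + pvRunWhile t c, d)
        = (pvFlush all min_len acc s (s + 1 + pvRunWhile t c), s + 1 + pvRunWhile t c, some d) by
      simp only [pvStep]
      rw [if_pos (by simp; exact fun hh => hdc hh.symm)]]
    have hrec := pvLoop_run all min_len (s + 1 + pvRunWhile t c)
      (pvFlush all min_len acc s (s + 1 + pvRunWhile t c)) d t' hdrop2
    simp only [] at hrec
    rw [hrec, hflush]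
    conv_rhs => rw [pvR]
    rw [hdrop]
    rw [show s + (pvRunWhile t c + 1) = s + 1 + pvRunWhile t c from by omega,
      List.append_assoc]
termination_by t.length
decreasing_by
  have h2 := congrArg List.length hdrop
  simp only [List.length_drop, List.length_cons] at h2
  omega

-- ===== VERDICT (by name: the statement is the Claim_ definition above) =====
theorem find_polyA_polyT_tracts_spec : Claim_equal_find_polyA_polyT_tracts := by
  intro seq min_len _
  unfold Spec_find_polyA_polyT_tracts find_polyA_polyT_tracts find_polyA_polyT_tracts_alt
  rw [pvAGo_eq_R]
  cases hcs : seq.toList with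
  | nil => simp [pvEnum, pvFlush, pvR]
  | cons c t =>
    simp only [pvEnum, List.foldl_cons]
    rw [show pvStep (c :: t) min_len ([], 0, none) (0, c)
        = (pvFlush (c :: t) min_len [] 0 0, 0, some c) by simp [pvStep]]
    rw [show pvFlush (c :: t) min_len [] 0 0 = [] by simp [pvFlush]]
    have h := pvLoop_run (c :: t) min_len 0 [] c t (by simp)
    simp only [] at h
    rw [show (0 : Nat) + 1 = 1 from rfl] at h
    rw [h, List.nil_append]
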